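-- pv_equiv track=rewrite | github.com/Fumlop/EdSystemchecker | python/create_stronghold_md.py | categorize_by_activity
-- ===== SOURCE A (Python) =====
-- def categorize_by_activity(systems, activity_field='undermining'):
--     """Categorize systems by activity level"""
--     high = []
--     medium = []
--     low = []
--
--     for system in systems:
--         activity = abs(system.get('net_cp', 0))
--
--         if activity >= 10000:
--             high.append(system)
--         elif activity >= 5000:
--             medium.append(system)
--         elif activity >= 1000:
--             low.append(system)
--
--     return high, medium, low
-- ===== SOURCE B (Python) =====
-- def categorize_by_activity(systems, activity_field='undermining'):
--     """Categorize systems by activity level"""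
--     high = [s for s in systems if abs(s.get('net_cp', 0)) >= 10000]
--     medium = [s for s in systems if 5000 <= abs(s.get('net_cp', 0)) < 10000]
--     low = [s for s in systems if 1000 <= abs(s.get('net_cp', 0)) < 5000]
--     return high, medium, low
-- ===== Notes on version B (the rewrite author's own statement) =====
-- stated objective: alternative
-- what changed: One append-dispatching loop with three accumulators is replaced by three independent filter passes (list comprehensions) with closed interval bounds mirroring the elif cascade.
import Mathlib
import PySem

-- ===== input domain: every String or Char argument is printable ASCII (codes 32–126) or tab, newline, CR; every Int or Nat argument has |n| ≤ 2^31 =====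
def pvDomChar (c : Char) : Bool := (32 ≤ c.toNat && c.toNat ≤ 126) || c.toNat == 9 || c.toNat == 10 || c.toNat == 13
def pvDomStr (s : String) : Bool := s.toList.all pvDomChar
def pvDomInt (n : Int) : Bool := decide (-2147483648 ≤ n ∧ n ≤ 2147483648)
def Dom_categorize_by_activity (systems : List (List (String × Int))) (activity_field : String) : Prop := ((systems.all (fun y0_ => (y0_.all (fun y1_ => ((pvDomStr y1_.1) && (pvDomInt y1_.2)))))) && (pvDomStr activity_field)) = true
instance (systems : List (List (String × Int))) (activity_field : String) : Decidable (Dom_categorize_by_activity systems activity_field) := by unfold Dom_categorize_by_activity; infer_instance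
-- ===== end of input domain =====

-- B replaces A's single dispatching loop with three independent filter passes (one per bucket); same cost class, different decomposition.

-- ===== PORT A =====
-- one pass: for each system, append to exactly one of the three accumulators (or none)
def categorize_by_activity (systems : List (List (String × Int))) (_activity_field : String) : (List (List (String × Int))) × (List (List (String × Int))) × (List (List (String × Int))) :=
  let acc := systems.foldl (fun (acc : List (List (String × Int)) × List (List (String × Int)) × List (List (String × Int))) system =>
    let activity := |(PySem.Dict.mk system).getD "net_cp" (0:Int)|
    if activity ≥ 10000 then (acc.1 ++ [system], acc.2.1, acc.2.2)
    else if activity ≥ 5000 then (acc.1, acc.2.1 ++ [system], acc.2.2)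
    else if activity ≥ 1000 then (acc.1, acc.2.1, acc.2.2 ++ [system])
    else acc) ([], [], [])
  acc

-- ===== PORT B =====
-- three filter passes with closed interval bounds
def categorize_by_activity_alt (systems : List (List (String × Int))) (_activity_field : String) : (List (List (String × Int))) × (List (List (String × Int))) × (List (List (String × Int))) :=
  let a := fun (s : List (String × Int)) => |(PySem.Dict.mk s).getD "net_cp" (0:Int)|
  (systems.filter (fun s => a s ≥ 10000),
   systems.filter (fun s => 5000 ≤ a s ∧ a s < 10000),
   systems.filter (fun s => 1000 ≤ a s ∧ a s < 5000))

-- ===== PRECONDITION & SPEC =====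
def Spec_categorize_by_activity (systems : List (List (String × Int))) (activity_field : String) (out : (List (List (String × Int))) × (List (List (String × Int))) × (List (List (String × Int)))) : Prop := out = categorize_by_activity_alt systems activity_field
instance (systems : List (List (String × Int))) (activity_field : String) (out : (List (List (String × Int))) × (List (List (String × Int))) × (List (List (String × Int)))) : Decidable (Spec_categorize_by_activity systems activity_field out) := by unfold Spec_categorize_by_activity; infer_instance

-- ===== CLAIM (what is proved, stated in full; the proofs are below) =====
def Claim_equal_categorize_by_activity : Prop := ∀ (systems : List (List (String × Int))) (activity_field : String), Dom_categorize_by_activity systems activity_field → Spec_categorize_by_activity systems activity_field (categorize_by_activity systems activity_field)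

-- ===== LEMMAS AND PROOFS =====
-- loop invariant: the fold from any accumulator appends exactly the three filters
theorem categorize_fold_eq (systems : List (List (String × Int)))
    (h m l : List (List (String × Int))) :
    systems.foldl (fun (acc : List (List (String × Int)) × List (List (String × Int)) × List (List (String × Int))) system =>
      let activity := |(PySem.Dict.mk system).getD "net_cp" (0:Int)|
      if activity ≥ 10000 then (acc.1 ++ [system], acc.2.1, acc.2.2)
      else if activity ≥ 5000 then (acc.1, acc.2.1 ++ [system], acc.2.2)
      else if activity ≥ 1000 then (acc.1, acc.2.1, acc.2.2 ++ [system])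
      else acc) (h, m, l)
    = (h ++ systems.filter (fun s => |(PySem.Dict.mk s).getD "net_cp" (0:Int)| ≥ 10000),
       m ++ systems.filter (fun s => decide (5000 ≤ |(PySem.Dict.mk s).getD "net_cp" (0:Int)| ∧ |(PySem.Dict.mk s).getD "net_cp" (0:Int)| < 10000)),
       l ++ systems.filter (fun s => decide (1000 ≤ |(PySem.Dict.mk s).getD "net_cp" (0:Int)| ∧ |(PySem.Dict.mk s).getD "net_cp" (0:Int)| < 5000))) := by
  induction systems generalizing h m l with
  | nil => simp
  | cons x xs ih =>
    simp only [List.foldl_cons, List.filter_cons]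
    by_cases h1 : |(PySem.Dict.mk x).getD "net_cp" (0:Int)| ≥ 10000
    · simp only [h1, if_pos]
      rw [ih]
      have h2 : ¬ (5000 ≤ |(PySem.Dict.mk x).getD "net_cp" (0:Int)| ∧ |(PySem.Dict.mk x).getD "net_cp" (0:Int)| < 10000) := by omega
      have h3 : ¬ (1000 ≤ |(PySem.Dict.mk x).getD "net_cp" (0:Int)| ∧ |(PySem.Dict.mk x).getD "net_cp" (0:Int)| < 5000) := by omega
      simp [h1, h2, h3]
    · by_cases h2 : |(PySem.Dict.mk x).getD "net_cp" (0:Int)| ≥ 5000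
      · simp only [h1, h2, if_neg, if_pos]
        rw [ih]
        have h2' : 5000 ≤ |(PySem.Dict.mk x).getD "net_cp" (0:Int)| ∧ |(PySem.Dict.mk x).getD "net_cp" (0:Int)| < 10000 := by omega
        have h3 : ¬ (1000 ≤ |(PySem.Dict.mk x).getD "net_cp" (0:Int)| ∧ |(PySem.Dict.mk x).getD "net_cp" (0:Int)| < 5000) := by omega
        simp [h1, h2', h3]
      · by_cases h3 : |(PySem.Dict.mk x).getD "net_cp" (0:Int)| ≥ 1000
        · simp only [h1, h2, h3, if_neg, if_pos]
          rw [ih]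
          have h3' : 1000 ≤ |(PySem.Dict.mk x).getD "net_cp" (0:Int)| ∧ |(PySem.Dict.mk x).getD "net_cp" (0:Int)| < 5000 := by omega
          have h2' : ¬ (5000 ≤ |(PySem.Dict.mk x).getD "net_cp" (0:Int)| ∧ |(PySem.Dict.mk x).getD "net_cp" (0:Int)| < 10000) := by omega
          simp [h1, h2', h3']
        · simp only [h1, h2, h3, if_neg]
          rw [ih]
          have h2' : ¬ (5000 ≤ |(PySem.Dict.mk x).getD "net_cp" (0:Int)| ∧ |(PySem.Dict.mk x).getD "net_cp" (0:Int)| < 10000) := by omega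
          have h3' : ¬ (1000 ≤ |(PySem.Dict.mk x).getD "net_cp" (0:Int)| ∧ |(PySem.Dict.mk x).getD "net_cp" (0:Int)| < 5000) := by omega
          simp [h1, h2', h3']

-- ===== VERDICT (by name: the statement is the Claim_ definition above) =====
theorem categorize_by_activity_spec : Claim_equal_categorize_by_activity := by
  intro systems activity_field _
  unfold Spec_categorize_by_activity categorize_by_activity categorize_by_activity_alt
  simp only []
  rw [categorize_fold_eq]
  simp
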